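-- pv_equiv track=rewrite | github.com/lyutyuh/structured-span-selector | minimize.py | get_sentence_map
-- ===== SOURCE A (Python) =====
-- def get_sentence_map(segments, sentence_end):
--     current = 0
--     sent_map = []
--     sent_end_idx = 0
--     assert len(sentence_end) == sum([len(s)-3 for s in segments])
--     for segment in segments:
--         sent_map.append(current)
--         sent_map.append(current)
--         for i in range(len(segment) - 3):
--             sent_map.append(current)
--             current += int(sentence_end[sent_end_idx])
--             sent_end_idx += 1
--         sent_map.append(current)
--     return sent_map
-- ===== SOURCE B (Python) =====
-- def get_sentence_map(segments, sentence_end):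
--     ends = [int(x) for x in sentence_end]
--     assert len(ends) == sum([len(s)-3 for s in segments])
--     prefix = [0]
--     for e in ends:
--         prefix.append(prefix[-1] + e)
--     out = []
--     idx = 0
--     for segment in segments:
--         k = len(segment) - 3
--         out.extend([prefix[idx]] * 2)
--         out.extend(prefix[idx:idx + k])
--         idx += k
--         out.append(prefix[idx])
--     return out
-- ===== Notes on version B (the rewrite author's own statement) =====
-- stated objective: alternative
-- what changed: A accumulates the running sentence-id inline in a single pass; B first builds a prefix-sum table of the sentence_end flags and then emits each segment's block by indexing and slicing that table (two-pass build-table-then-emit decomposition).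
import Mathlib
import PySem

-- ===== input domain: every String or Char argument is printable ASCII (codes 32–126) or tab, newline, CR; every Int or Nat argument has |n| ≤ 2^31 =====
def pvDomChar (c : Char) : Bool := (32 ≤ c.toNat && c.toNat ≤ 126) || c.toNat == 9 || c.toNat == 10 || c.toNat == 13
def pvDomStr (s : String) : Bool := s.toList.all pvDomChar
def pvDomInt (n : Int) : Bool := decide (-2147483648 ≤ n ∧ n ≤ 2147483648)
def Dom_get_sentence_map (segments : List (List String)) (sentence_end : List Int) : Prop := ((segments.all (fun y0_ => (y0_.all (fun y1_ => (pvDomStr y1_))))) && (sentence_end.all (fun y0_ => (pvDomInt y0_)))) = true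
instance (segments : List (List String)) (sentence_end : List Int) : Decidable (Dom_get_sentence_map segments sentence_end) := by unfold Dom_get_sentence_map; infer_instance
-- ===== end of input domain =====

-- B replaces A's single in-line accumulation pass by a two-pass structure (prefix-sum table, then
-- per-segment emission by slicing); objective: alternative decomposition, same cost.
-- A raises (AssertionError or IndexError) on inputs excluded by Pre_; equivalence is about inputs where A returns.

-- ===== PORT A =====
-- inner loop: for i in range(len(segment)-3): append current; current += int(sentence_end[idx]); idx += 1
-- int() on an int is the identity; sentence_end[idx] raises IndexError when out of range (excluded by Pre_), ported as pyGetD … 0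
def getSentenceMapInner (n : Nat) (send : List Int) (current : Int) (idx : Nat) (acc : List Int) : List Int × Int × Nat :=
  match n with
  | 0 => (acc, current, idx)
  | Nat.succ m => getSentenceMapInner m send (current + PySem.List.pyGetD send (idx : Int) 0) (idx + 1) (acc ++ [current])

def getSentenceMapOuter (segs : List (List String)) (send : List Int) (current : Int) (idx : Nat) (acc : List Int) : List Int :=
  match segs with
  | [] => acc
  | s :: rest =>
    let r := getSentenceMapInner (s.length - 3) send current idx (acc ++ [current, current])
    getSentenceMapOuter rest send r.2.1 r.2.2 (r.1 ++ [r.2.1])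

-- the assert raises AssertionError exactly when the Pre_ length condition fails; such inputs are excluded by Pre_
def get_sentence_map (segments : List (List String)) (sentence_end : List Int) : List Int :=
  getSentenceMapOuter segments sentence_end 0 0 []

-- ===== PORT B =====
-- prefix = [0]; for e in ends: prefix.append(prefix[-1] + e)   (prefix is never empty, prefix[-1] via pyGetD (-1))
def getSentenceMapPrefix (ends : List Int) : List Int :=
  ends.foldl (fun p e => p ++ [PySem.List.pyGetD p (-1) 0 + e]) [0]

-- per-segment emission: [prefix[idx]]*2, prefix[idx:idx+k], then prefix[idx+k]
def getSentenceMapEmit (segs : List (List String)) (pref : List Int) (idx : Nat) (out : List Int) : List Int :=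
  match segs with
  | [] => out
  | s :: rest =>
    let k := s.length - 3
    getSentenceMapEmit rest pref (idx + k)
      (out ++ [PySem.List.pyGetD pref (idx : Int) 0, PySem.List.pyGetD pref (idx : Int) 0]
           ++ PySem.List.slice pref (some (idx : Int)) (some ((idx : Int) + (k : Int)))
           ++ [PySem.List.pyGetD pref ((idx : Int) + (k : Int)) 0])

-- ends = [int(x) for x in sentence_end] : int() on an int is the identity; same assert as A (excluded by Pre_)
def get_sentence_map_alt (segments : List (List String)) (sentence_end : List Int) : List Int :=
  getSentenceMapEmit segments (getSentenceMapPrefix (sentence_end.map (fun x => x))) 0 []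

-- ===== PRECONDITION & SPEC =====
-- Pre_ excludes exactly the inputs where A raises: AssertionError when len(sentence_end) ≠ Σ(len(s)-3),
-- and (when some segment has length < 3 but the signed sum still matches) the IndexError the extra reads cause.
def Pre_get_sentence_map (segments : List (List String)) (sentence_end : List Int) : Prop :=
  (∀ s ∈ segments, 3 ≤ s.length) ∧ sentence_end.length = (segments.map (fun s => s.length - 3)).sum
instance (segments : List (List String)) (sentence_end : List Int) : Decidable (Pre_get_sentence_map segments sentence_end) := by unfold Pre_get_sentence_map; infer_instance

def pvWitness_get_sentence_map : List (List String) × List Int := ([["a", "b", "c", "d"]], [1])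

def Spec_get_sentence_map (segments : List (List String)) (sentence_end : List Int) (out : List Int) : Prop := out = get_sentence_map_alt segments sentence_end
instance (segments : List (List String)) (sentence_end : List Int) (out : List Int) : Decidable (Spec_get_sentence_map segments sentence_end out) := by unfold Spec_get_sentence_map; infer_instance

-- ===== CLAIM (what is proved, stated in full; the proofs are below) =====
def Claim_equal_get_sentence_map : Prop := ∀ (segments : List (List String)) (sentence_end : List Int), Dom_get_sentence_map segments sentence_end → Pre_get_sentence_map segments sentence_end → Spec_get_sentence_map segments sentence_end (get_sentence_map segments sentence_end)

-- ===== LEMMAS AND PROOFS =====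

theorem takeSum_succ (xs : List Int) (i : Nat) (h : i < xs.length) :
    (xs.take (i + 1)).sum = (xs.take i).sum + xs[i] :=
  List.sum_take_succ xs i h

theorem map_range_succ_shift (f : Nat → Int) (n : Nat) :
    (List.range (n + 1)).map f = f 0 :: (List.range n).map (fun j => f (j + 1)) := by
  rw [List.range_succ_eq_map, List.map_cons, List.map_map]
  rfl

theorem inner_spec (k : Nat) : ∀ (send : List Int) (i : Nat) (acc : List Int), i + k ≤ send.length →
    getSentenceMapInner k send ((send.take i).sum) i acc
      = (acc ++ (List.range k).map (fun j => ((send.take (i + j)).sum : Int)), (send.take (i + k)).sum, i + k) := by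
  induction k with
  | zero => intro send i acc h; simp [getSentenceMapInner]
  | succ m ih =>
    intro send i acc h
    have hi : i < send.length := by omega
    have hget : PySem.List.pyGetD send (i : Int) 0 = send[i] := by
      rw [PySem.List.pyGetD_natCast]
      exact List.getD_eq_getElem _ _ hi
    have hstep : (send.take i).sum + PySem.List.pyGetD send (i : Int) 0 = (send.take (i + 1)).sum := by
      rw [hget, takeSum_succ send i hi]
    rw [getSentenceMapInner, hstep, ih send (i + 1) (acc ++ [(send.take i).sum]) (by omega)]
    simp only [Prod.mk.injEq]
    refine ⟨?_, ?_, by omega⟩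
    · rw [map_range_succ_shift]
      simp only [add_zero, List.append_assoc, List.singleton_append]
      congr 2
      apply List.map_congr_left
      intro j _
      rw [show i + (j + 1) = i + 1 + j by omega]
    · rw [show i + (m + 1) = i + 1 + m by omega]

theorem pref_aux (ends : List Int) : ∀ (p : List Int) (c : Int),
    List.foldl (fun q e => q ++ [PySem.List.pyGetD q (-1) 0 + e]) (p ++ [c]) ends
      = p ++ (List.range (ends.length + 1)).map (fun m => c + (ends.take m).sum) := by
  induction ends with
  | nil => intro p c; simp [List.range_one]
  | cons e rest ih =>
    intro p c
    rw [List.foldl_cons, PySem.List.pyGetD_neg_one_append_singleton]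
    rw [ih (p ++ [c]) (c + e)]
    simp only [List.length_cons]
    rw [map_range_succ_shift (fun m => c + ((e :: rest).take m).sum) (rest.length + 1)]
    simp only [List.take_zero, List.sum_nil, add_zero, List.take_succ_cons,
      List.sum_cons, List.append_assoc, List.singleton_append]
    congr 2
    apply List.map_congr_left
    intro m _
    ring

theorem pref_spec (ends : List Int) :
    getSentenceMapPrefix ends = (List.range (ends.length + 1)).map (fun m => ((ends.take m).sum : Int)) := by
  have h := pref_aux ends [] 0
  simpa [getSentenceMapPrefix] using h

theorem getD_map_range_lem (g : Nat → Int) (n i : Nat) (h : i < n) :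
    ((List.range n).map g).getD i 0 = g i := by
  rw [List.getD_eq_getElem _ _ (by simpa using h)]
  simp

theorem slice_map_range (g : Nat → Int) (n i k : Nat) (h : i + k ≤ n) :
    (((List.range n).map g).drop i).take k = (List.range k).map (fun j => g (i + j)) := by
  apply List.ext_getElem
  · simp; omega
  · intro j h1 h2
    simp

theorem outer_eq (segs : List (List String)) : ∀ (send : List Int) (i : Nat) (acc : List Int),
    (∀ s ∈ segs, 3 ≤ s.length) →
    i + ((segs.map (fun s => s.length - 3)).sum) = send.length →
    getSentenceMapOuter segs send ((send.take i).sum) i acc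
      = getSentenceMapEmit segs (getSentenceMapPrefix send) i acc := by
  induction segs with
  | nil => intro send i acc _ _; rfl
  | cons s rest ih =>
    intro send i acc hlen hsum
    have hik : i + (s.length - 3) ≤ send.length := by
      simp [List.map_cons, List.sum_cons] at hsum; omega
    rw [getSentenceMapOuter, inner_spec (s.length - 3) send i (acc ++ [(send.take i).sum, (send.take i).sum]) hik]
    rw [getSentenceMapEmit]
    have hgd : ∀ m : Nat, m ≤ send.length →
        PySem.List.pyGetD (getSentenceMapPrefix send) (m : Int) 0 = (send.take m).sum := by
      intro m hm
      rw [PySem.List.pyGetD_natCast, pref_spec]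
      exact getD_map_range_lem _ (send.length + 1) m (by omega)
    have hslice : PySem.List.slice (getSentenceMapPrefix send) (some (i : Int))
        (some ((i : Int) + ((s.length - 3 : Nat) : Int)))
        = (List.range (s.length - 3)).map (fun j => ((send.take (i + j)).sum : Int)) := by
      rw [PySem.List.slice_natCast_add, pref_spec]
      exact slice_map_range _ (send.length + 1) i (s.length - 3) (by omega)
    rw [ih send (i + (s.length - 3)) _ (fun t ht => hlen t (List.mem_cons_of_mem _ ht))
      (by simp [List.map_cons, List.sum_cons] at hsum ⊢; omega)]
    congr 1
    rw [hgd i (by omega), hslice]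
    rw [show ((i : Int) + ((s.length - 3 : Nat) : Int)) = (((i + (s.length - 3) : Nat)) : Int) by push_cast; ring]
    rw [hgd (i + (s.length - 3)) hik]

-- ===== VERDICT (by name: the statement is the Claim_ definition above) =====
theorem get_sentence_map_spec : Claim_equal_get_sentence_map := by
  intro segments sentence_end _ hpre
  unfold Spec_get_sentence_map get_sentence_map get_sentence_map_alt
  rw [List.map_id']
  have h0 : (0 : Int) = (sentence_end.take 0).sum := by simp
  rw [h0]
  exact outer_eq segments sentence_end 0 [] hpre.1 (by simpa using hpre.2.symm)
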